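-- pv_equiv track=rewrite | github.com/patrickchugh/terravision | modules/resource_handlers/aws.py | link_sqs_queue_policy
-- ===== SOURCE A (Python) =====
-- from typing import Any, Dict, List
--
-- def link_sqs_queue_policy(terraform_data: Dict[str, List[str]]) -> Dict[str, List[str]]:
--     """Link SQS queues to resources via queue policies.
--
--     Args:
--         terraform_data: Resource graph dictionary
--
--     Returns:
--         Updated graph with SQS queue links
--     """
--     result = dict(terraform_data)
--
--     # Map queue policies to SQS queues
--     # A policy points to its queue: aws_sqs_queue_policy.main -> aws_sqs_queue.main
--     policy_to_queue = {}
--     for resource, deps in sorted(terraform_data.items()):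
--         if "aws_sqs_queue_policy" in resource:
--             # Find the queue this policy references
--             for dep in deps:
--                 if "aws_sqs_queue" in dep and "policy" not in dep:
--                     policy_to_queue[resource] = dep
--
--     # Find resources that connect to queue policies and add transitive SQS queue link
--     # E.g., lambda -> policy, so lambda should also -> queue
--     for resource, deps in sorted(terraform_data.items()):
--         for dep in deps:
--             if "aws_sqs_queue_policy" in dep and dep in policy_to_queue:
--                 sqs_queue = policy_to_queue[dep]
--                 if sqs_queue not in result[resource]:
--                     result[resource].append(sqs_queue)
--     return result
-- ===== SOURCE B (Python) =====
-- def link_sqs_queue_policy(terraform_data):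
--     """Link SQS queues to resources via queue policies (single pass, no precomputed index)."""
--     def queue_of(policy):
--         q = None
--         for d in terraform_data.get(policy, []):
--             if "aws_sqs_queue" in d and "policy" not in d:
--                 q = d
--         return q
--
--     result = {}
--     for resource, deps in terraform_data.items():
--         new_deps = list(deps)
--         for dep in deps:
--             if "aws_sqs_queue_policy" in dep:
--                 q = queue_of(dep)
--                 if q is not None and q not in new_deps:
--                     new_deps.append(q)
--         result[resource] = new_deps
--     return result
-- ===== Notes on version B (the rewrite author's own statement) =====
-- stated objective: simpler
-- what changed: Drops the two sorted() passes and the precomputed policy-to-queue index: a single pass over the dict items that, for each policy dependency, looks the policy up directly and scans its deps inline for the last matching queue; builds a fresh result dict instead of mutating the shallow copy in place.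
import Mathlib
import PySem

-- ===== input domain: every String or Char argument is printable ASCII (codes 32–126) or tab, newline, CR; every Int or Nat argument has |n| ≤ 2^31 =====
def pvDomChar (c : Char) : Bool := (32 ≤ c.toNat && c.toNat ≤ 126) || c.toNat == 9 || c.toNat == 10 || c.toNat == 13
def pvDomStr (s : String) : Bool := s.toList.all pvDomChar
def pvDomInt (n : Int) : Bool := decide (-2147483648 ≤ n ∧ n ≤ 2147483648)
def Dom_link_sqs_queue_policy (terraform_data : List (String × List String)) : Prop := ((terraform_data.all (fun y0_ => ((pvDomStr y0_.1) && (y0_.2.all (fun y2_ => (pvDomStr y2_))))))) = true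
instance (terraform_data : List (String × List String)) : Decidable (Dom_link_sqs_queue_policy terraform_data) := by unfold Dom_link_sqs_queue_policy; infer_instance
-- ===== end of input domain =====

-- B replaces A's sorted passes and precomputed policy→queue index by one direct pass with
-- inline lookup (objective: simpler). Equivalence is about the RETURN value only: Python A
-- mutates the input dict's lists in place (shallow copy), B builds fresh lists.

-- ===== PORT A =====
-- "aws_sqs_queue" in dep and "policy" not in dep
def pvIsQueueDep (dep : String) : Bool :=
  PySem.Str.isIn "aws_sqs_queue" dep && !(PySem.Str.isIn "policy" dep)

-- first loop body: for dep in deps: if queue-dep: policy_to_queue[resource] = dep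
def pvPolicyStep (ptq : PySem.Dict String String) (rd : String × List String) : PySem.Dict String String :=
  if PySem.Str.isIn "aws_sqs_queue_policy" rd.1 then
    rd.2.foldl (fun p dep => if pvIsQueueDep dep then p.insert rd.1 dep else p) ptq
  else ptq

-- second loop body over one resource's deps.  Python iterates the live result[resource]
-- list; an element appended during the scan contains "aws_sqs_queue" and not "policy",
-- so it can never satisfy the branch test "aws_sqs_queue_policy" in dep nor be a key of
-- policy_to_queue — iterating the snapshot rd.2 is exact.
def pvLinkBody (ptq : PySem.Dict String String) (r : String)
    (res : PySem.Dict String (List String)) (dep : String) : PySem.Dict String (List String) :=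
  if PySem.Str.isIn "aws_sqs_queue_policy" dep && ptq.contains dep then
    let q := ptq.getD dep ""
    if (res.getD r []).contains q then res else res.modify r [] (· ++ [q])
  else res

def pvLinkStep (ptq : PySem.Dict String String) (res : PySem.Dict String (List String)) (rd : String × List String) : PySem.Dict String (List String) :=
  rd.2.foldl (pvLinkBody ptq rd.1) res

-- sorted(terraform_data.items()) compares (key, value) tuples; under Pre_ keys are
-- distinct (a Python dict), so the value component never breaks a tie: key-only sort is exact.
def link_sqs_queue_policy (terraform_data : List (String × List String)) : List (String × List String) :=
  let items := PySem.List.sorted terraform_data (fun p => p.1) false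
  let ptq := items.foldl pvPolicyStep PySem.Dict.empty
  (items.foldl (pvLinkStep ptq) (PySem.Dict.mk terraform_data)).items

-- ===== PORT B =====
-- last dep of terraform_data.get(policy, []) that is a queue dep (None if none)
def pvQueueOf (terraform_data : List (String × List String)) (policy : String) : Option String :=
  ((PySem.Dict.mk terraform_data).getD policy []).foldl
    (fun q dep =>
      if PySem.Str.isIn "aws_sqs_queue" dep && !(PySem.Str.isIn "policy" dep) then some dep else q)
    none

def pvNewDeps (terraform_data : List (String × List String)) (deps : List String) : List String :=
  deps.foldl (fun nd dep =>
    if PySem.Str.isIn "aws_sqs_queue_policy" dep then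
      match pvQueueOf terraform_data dep with
      | some q => if nd.contains q then nd else nd ++ [q]
      | none => nd
    else nd) deps

def link_sqs_queue_policy_alt (terraform_data : List (String × List String)) : List (String × List String) :=
  (terraform_data.foldl
    (fun res rd => res.insert rd.1 (pvNewDeps terraform_data rd.2))
    PySem.Dict.empty).items

-- ===== PRECONDITION & SPEC =====
-- Pre_ excludes association lists with duplicate keys: they do not denote a Python dict
-- (the function's argument), so A's behaviour on them is not defined by the source.
def Pre_link_sqs_queue_policy (terraform_data : List (String × List String)) : Prop :=
  (terraform_data.map Prod.fst).Nodup
instance (terraform_data : List (String × List String)) : Decidable (Pre_link_sqs_queue_policy terraform_data) := by unfold Pre_link_sqs_queue_policy; infer_instance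

def pvWitness_link_sqs_queue_policy : (List (String × List String)) :=
  [("aws_sqs_queue_policy.main", ["aws_sqs_queue.main"]),
   ("aws_lambda_function.f", ["aws_sqs_queue_policy.main"])]

def Spec_link_sqs_queue_policy (terraform_data : List (String × List String)) (out : List (String × List String)) : Prop := out = link_sqs_queue_policy_alt terraform_data
instance (terraform_data : List (String × List String)) (out : List (String × List String)) : Decidable (Spec_link_sqs_queue_policy terraform_data out) := by unfold Spec_link_sqs_queue_policy; infer_instance

-- ===== CLAIM (what is proved, stated in full; the proofs are below) =====
def Claim_equal_link_sqs_queue_policy : Prop := ∀ (terraform_data : List (String × List String)), Dom_link_sqs_queue_policy terraform_data → Pre_link_sqs_queue_policy terraform_data → Spec_link_sqs_queue_policy terraform_data (link_sqs_queue_policy terraform_data)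

-- ===== LEMMAS AND PROOFS =====

-- find?-by-key is permutation invariant on key-Nodup lists
theorem pv_find?_perm {l l' : List (String × List String)} (hp : l.Perm l')
    (h : (l.map Prod.fst).Nodup) (d : String) :
    l.find? (fun p => p.1 == d) = l'.find? (fun p => p.1 == d) := by
  cases hfl : l.find? (fun p => p.1 == d) with
  | none =>
    rw [List.find?_eq_none] at hfl
    symm; rw [List.find?_eq_none]
    intro x hx; exact hfl x (hp.symm.subset hx)
  | some a =>
    have ha : a ∈ l := List.mem_of_find?_eq_some hfl
    have hpa := List.find?_some hfl
    have hsome : (l'.find? (fun p => p.1 == d)).isSome = true :=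
      List.find?_isSome.2 ⟨a, hp.subset ha, hpa⟩
    cases hfl' : l'.find? (fun p => p.1 == d) with
    | none => rw [hfl'] at hsome; simp at hsome
    | some b =>
      have hb : b ∈ l := hp.symm.subset (List.mem_of_find?_eq_some hfl')
      have hpb := List.find?_some hfl'
      have : a = b := List.inj_on_of_nodup_map h ha hb (by
        simp only [beq_iff_eq] at hpa hpb; simp [hpa, hpb])
      rw [this]

-- get? of a literal dict is first-match find?
theorem pv_get?_mk (l : List (String × List String)) (d : String) :
    (PySem.Dict.mk l).get? d = (l.find? (fun p => p.1 == d)).map Prod.snd := by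
  induction l with
  | nil => simp [PySem.Dict.get?]
  | cons x xs ih =>
    rw [show PySem.Dict.mk (x :: xs) = { items := (x.1, x.2) :: xs } by rfl]
    rw [PySem.Dict.get?_mk_cons]
    by_cases hx : (x.1 == d) = true
    · simp [List.find?_cons, hx]
    · simp only [hx, if_false]
      rw [show ({ items := xs } : PySem.Dict String (List String)) = PySem.Dict.mk xs from rfl, ih]
      simp [List.find?_cons, hx]

-- ----- stage 1: the policy_to_queue dict -----

-- last queue-dep accumulator (the value A's inner insert loop leaves at a key)
def pvLastQ (deps : List String) (q0 : Option String) : Option String :=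
  deps.foldl (fun q dep => if pvIsQueueDep dep then some dep else q) q0

theorem pv_policy_inner_ne (deps : List String) (p : PySem.Dict String String) (r x : String)
    (hx : x ≠ r) :
    (deps.foldl (fun p dep => if pvIsQueueDep dep then p.insert r dep else p) p).get? x = p.get? x := by
  induction deps generalizing p with
  | nil => rfl
  | cons dep rest ih =>
    simp only [List.foldl_cons]
    rw [ih]
    by_cases hq : pvIsQueueDep dep = true
    · simp only [hq, if_true]; exact PySem.Dict.get?_insert_of_ne p dep hx
    · simp [hq]

theorem pv_policy_inner_self (deps : List String) (p : PySem.Dict String String) (r : String) :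
    (deps.foldl (fun p dep => if pvIsQueueDep dep then p.insert r dep else p) p).get? r
      = pvLastQ deps (p.get? r) := by
  induction deps generalizing p with
  | nil => rfl
  | cons dep rest ih =>
    simp only [List.foldl_cons, pvLastQ]
    by_cases hq : pvIsQueueDep dep = true
    · simp only [hq, if_true]
      rw [ih, show (p.insert r dep).get? r = some dep from PySem.Dict.get?_insert_self p r dep]
      rfl
    · simp only [hq, if_false]; exact ih p

theorem pv_policy_step_ne (p : PySem.Dict String String) (rd : String × List String) (x : String)
    (hx : x ≠ rd.1) : (pvPolicyStep p rd).get? x = p.get? x := by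
  unfold pvPolicyStep
  by_cases hc : PySem.Str.isIn "aws_sqs_queue_policy" rd.1 = true
  · rw [if_pos hc]; exact pv_policy_inner_ne rd.2 p rd.1 x hx
  · rw [if_neg hc]

theorem pv_ptq_fold (l : List (String × List String)) (acc : PySem.Dict String String) (d : String)
    (hnd : (l.map Prod.fst).Nodup) (hacc : d ∈ l.map Prod.fst → acc.get? d = none) :
    (l.foldl pvPolicyStep acc).get? d
      = match l.find? (fun p => p.1 == d) with
        | none => acc.get? d
        | some p => if PySem.Str.isIn "aws_sqs_queue_policy" d then pvLastQ p.2 none else none := by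
  induction l generalizing acc with
  | nil => rfl
  | cons rd rest ih =>
    simp only [List.map_cons, List.nodup_cons] at hnd
    simp only [List.foldl_cons, List.find?_cons]
    by_cases hk : (rd.1 == d) = true
    · have hkd : rd.1 = d := by simpa using hk
      simp only [hk]
      have hnone : acc.get? d = none := hacc (by simp [← hkd])
      have hrest : d ∉ rest.map Prod.fst := hkd ▸ hnd.1
      have hnf : rest.find? (fun p => p.1 == d) = none := by
        rw [List.find?_eq_none]; intro p hp hbeq
        have hpd : p.1 = d := by simpa using hbeq
        exact hrest (by rw [← hpd]; exact List.mem_map_of_mem hp)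
      rw [ih (pvPolicyStep acc rd) hnd.2 (fun h => absurd h hrest), hnf]
      unfold pvPolicyStep
      rw [hkd]
      by_cases hc : PySem.Str.isIn "aws_sqs_queue_policy" d = true
      · rw [if_pos hc, if_pos hc, pv_policy_inner_self rd.2 acc d, hnone]
      · rw [if_neg hc, if_neg hc]
        exact hnone
    · simp only [hk]
      have hxd : d ≠ rd.1 := fun h => by simp [h] at hk
      have hstep : (pvPolicyStep acc rd).get? d = acc.get? d := pv_policy_step_ne acc rd d hxd
      rw [ih (pvPolicyStep acc rd) hnd.2 (fun h => by rw [hstep]; exact hacc (by simp [h]))]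
      cases rest.find? (fun p => p.1 == d) <;> simp [hstep]

-- the unique entry of a key-Nodup list is what find? returns
theorem pv_find?_self {l : List (String × List String)} {p : String × List String}
    (hnd : (l.map Prod.fst).Nodup) (hp : p ∈ l) : l.find? (fun q => q.1 == p.1) = some p := by
  have hsome : (l.find? (fun q => q.1 == p.1)).isSome = true :=
    List.find?_isSome.2 ⟨p, hp, by simp⟩
  cases hf : l.find? (fun q => q.1 == p.1) with
  | none => rw [hf] at hsome; simp at hsome
  | some q =>
    have hq : q ∈ l := List.mem_of_find?_eq_some hf
    have hqk := List.find?_some hf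
    have : q = p := List.inj_on_of_nodup_map hnd hq hp (by simpa using hqk)
    rw [this]

-- stage-1 conclusion: A's index agrees with B's direct lookup on policy-named deps
theorem pv_ptq_eq_queueOf (td : List (String × List String)) (d : String)
    (hnd : (td.map Prod.fst).Nodup)
    (hc : PySem.Str.isIn "aws_sqs_queue_policy" d = true) :
    ((PySem.List.sorted td (fun p => p.1) false).foldl pvPolicyStep PySem.Dict.empty).get? d
      = pvQueueOf td d := by
  have hperm := PySem.List.sorted_perm td (fun p => p.1) false
  have hnds : ((PySem.List.sorted td (fun p => p.1) false).map Prod.fst).Nodup :=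
    ((hperm.map Prod.fst).nodup_iff).2 hnd
  rw [pv_ptq_fold _ PySem.Dict.empty d hnds (fun _ => PySem.Dict.get?_empty d),
      pv_find?_perm hperm hnds d]
  unfold pvQueueOf
  rw [PySem.Dict.getD_eq_get?_getD, pv_get?_mk]
  cases hf : td.find? (fun p => p.1 == d) with
  | none => simp only [hf]; rw [PySem.Dict.get?_empty]; rfl
  | some p => simp only [hf]; rw [if_pos hc]; rfl

-- ----- stage 2: the second loop -----

-- the inner append loop with A's index, as a pure function of the current list
def pvNewDepsP (ptq : PySem.Dict String String) (deps cur : List String) : List String :=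
  deps.foldl (fun nd dep =>
    if PySem.Str.isIn "aws_sqs_queue_policy" dep && ptq.contains dep then
      if nd.contains (ptq.getD dep "") then nd else nd ++ [ptq.getD dep ""]
    else nd) cur

theorem pv_link_fold_ne (deps : List String) (ptq : PySem.Dict String String) (r : String)
    (res : PySem.Dict String (List String)) (x : String) (hx : x ≠ r) :
    (deps.foldl (pvLinkBody ptq r) res).getD x [] = res.getD x [] := by
  induction deps generalizing res with
  | nil => rfl
  | cons dep rest ih =>
    rw [List.foldl_cons, ih]
    simp only [pvLinkBody]
    by_cases hc : (PySem.Str.isIn "aws_sqs_queue_policy" dep && ptq.contains dep) = true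
    · rw [if_pos hc]
      by_cases hm : ((res.getD r []).contains (ptq.getD dep "")) = true
      · rw [if_pos hm]
      · rw [if_neg hm]
        exact PySem.Dict.getD_modify_of_ne res [] _ hx
    · rw [if_neg hc]

theorem pv_link_fold_keys (deps : List String) (ptq : PySem.Dict String String) (r : String)
    (res : PySem.Dict String (List String)) (hr : res.contains r = true) :
    (deps.foldl (pvLinkBody ptq r) res).keys = res.keys := by
  induction deps generalizing res with
  | nil => rfl
  | cons dep rest ih =>
    rw [List.foldl_cons]
    simp only [pvLinkBody]
    by_cases hc : (PySem.Str.isIn "aws_sqs_queue_policy" dep && ptq.contains dep) = true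
    · rw [if_pos hc]
      by_cases hm : ((res.getD r []).contains (ptq.getD dep "")) = true
      · rw [if_pos hm]; exact ih res hr
      · rw [if_neg hm]
        rw [ih _ (by rw [PySem.Dict.contains_modify]; simp [hr])]
        rw [PySem.Dict.keys_modify, PySem.Dict.keys_insert_of_contains res _ hr]
    · rw [if_neg hc]; exact ih res hr

theorem pv_link_fold_self (deps : List String) (ptq : PySem.Dict String String) (r : String)
    (res : PySem.Dict String (List String)) :
    (deps.foldl (pvLinkBody ptq r) res).getD r [] = pvNewDepsP ptq deps (res.getD r []) := by
  unfold pvNewDepsP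
  induction deps generalizing res with
  | nil => rfl
  | cons dep rest ih =>
    rw [List.foldl_cons, List.foldl_cons]
    simp only [pvLinkBody]
    by_cases hc : (PySem.Str.isIn "aws_sqs_queue_policy" dep && ptq.contains dep) = true
    · rw [if_pos hc, if_pos hc]
      by_cases hm : ((res.getD r []).contains (ptq.getD dep "")) = true
      · rw [if_pos hm, if_pos hm]; exact ih res
      · rw [if_neg hm, if_neg hm, ih _, PySem.Dict.getD_modify_self res r [] _]
    · rw [if_neg hc, if_neg hc]; exact ih res

theorem pv_outer (ptq : PySem.Dict String String) (l : List (String × List String))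
    (res : PySem.Dict String (List String)) (hnd : (l.map Prod.fst).Nodup)
    (hres : ∀ p ∈ l, res.contains p.1 = true ∧ res.getD p.1 [] = p.2) :
    (l.foldl (pvLinkStep ptq) res).keys = res.keys ∧
    ∀ x, (l.foldl (pvLinkStep ptq) res).getD x []
      = match l.find? (fun p => p.1 == x) with
        | some p => pvNewDepsP ptq p.2 p.2
        | none => res.getD x [] := by
  induction l generalizing res with
  | nil => exact ⟨rfl, fun x => rfl⟩
  | cons rd rest ih =>
    simp only [List.map_cons, List.nodup_cons] at hnd
    have hhead := hres rd (by simp)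
    have hkeys' : (pvLinkStep ptq res rd).keys = res.keys :=
      pv_link_fold_keys rd.2 ptq rd.1 res hhead.1
    have hres' : ∀ p ∈ rest, (pvLinkStep ptq res rd).contains p.1 = true ∧
        (pvLinkStep ptq res rd).getD p.1 [] = p.2 := by
      intro p hp
      have hne : p.1 ≠ rd.1 := by
        intro h; exact hnd.1 (h ▸ List.mem_map_of_mem hp)
      have hcont : (pvLinkStep ptq res rd).contains p.1 = true := by
        rw [PySem.Dict.contains_iff_mem_keys, hkeys', ← PySem.Dict.contains_iff_mem_keys]
        exact (hres p (List.mem_cons_of_mem rd hp)).1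
      refine ⟨hcont, ?_⟩
      rw [show pvLinkStep ptq res rd = rd.2.foldl (pvLinkBody ptq rd.1) res from rfl,
          pv_link_fold_ne rd.2 ptq rd.1 res p.1 hne]
      exact (hres p (List.mem_cons_of_mem rd hp)).2
    obtain ⟨ihk, ihg⟩ := ih (pvLinkStep ptq res rd) hnd.2 hres'
    refine ⟨by rw [List.foldl_cons, ihk, hkeys'], ?_⟩
    intro x
    rw [List.foldl_cons, ihg x, List.find?_cons]
    by_cases hk : (rd.1 == x) = true
    · have hkx : rd.1 = x := by simpa using hk
      have hrest : rest.find? (fun p => p.1 == x) = none := by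
        rw [List.find?_eq_none]; intro p hp hbeq
        have hpx : p.1 = x := by simpa using hbeq
        exact hnd.1 (by rw [hkx, ← hpx]; exact List.mem_map_of_mem hp)
      rw [hrest]
      simp only [hk]
      rw [← hkx, show pvLinkStep ptq res rd = rd.2.foldl (pvLinkBody ptq rd.1) res from rfl,
          pv_link_fold_self rd.2 ptq rd.1 res, hhead.2]
    · simp only [hk]
      have hne : x ≠ rd.1 := fun h => by simp [h] at hk
      cases rest.find? (fun p => p.1 == x) with
      | some p => rfl
      | none =>
        rw [show pvLinkStep ptq res rd = rd.2.foldl (pvLinkBody ptq rd.1) res from rfl,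
            pv_link_fold_ne rd.2 ptq rd.1 res x hne]

-- bridge: the inner loop with A's index equals B's inner loop with direct lookup
theorem pv_newdeps_bridge (td : List (String × List String)) (hnd : (td.map Prod.fst).Nodup)
    (deps cur : List String) :
    pvNewDepsP ((PySem.List.sorted td (fun p => p.1) false).foldl pvPolicyStep PySem.Dict.empty)
        deps cur
      = deps.foldl (fun nd dep =>
          if PySem.Str.isIn "aws_sqs_queue_policy" dep then
            match pvQueueOf td dep with
            | some q => if nd.contains q then nd else nd ++ [q]
            | none => nd
          else nd) cur := by
  unfold pvNewDepsP
  induction deps generalizing cur with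
  | nil => rfl
  | cons dep rest ih =>
    rw [List.foldl_cons, List.foldl_cons, ← ih]
    congr 1
    set ptq := (PySem.List.sorted td (fun p => p.1) false).foldl pvPolicyStep PySem.Dict.empty with hptq
    by_cases hc : PySem.Str.isIn "aws_sqs_queue_policy" dep = true
    · have hget : ptq.get? dep = pvQueueOf td dep := pv_ptq_eq_queueOf td dep hnd hc
      rw [PySem.Dict.getD_eq_get?_getD, PySem.Dict.contains_eq_isSome_get?, hget, if_pos hc]
      cases hq : pvQueueOf td dep with
      | none =>
        rw [if_neg]
        intro h
        rw [Bool.and_eq_true] at h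
        exact Bool.false_ne_true h.2
      | some q =>
        rw [if_pos (by rw [hc]; rfl)]
        rfl
    · have h1 : ¬((PySem.Str.isIn "aws_sqs_queue_policy" dep && ptq.contains dep) = true) := by
        rw [Bool.eq_false_iff.mpr hc]
        intro h
        rw [Bool.and_eq_true] at h
        exact Bool.false_ne_true h.1
      rw [if_neg h1, if_neg hc]

-- a dict's items are determined by its keys (in order) and get?
theorem pv_items_eq (d : PySem.Dict String (List String)) (l : List (String × List String))
    (hk : d.keys = l.map Prod.fst) (hnd : (l.map Prod.fst).Nodup)
    (hg : ∀ p ∈ l, d.get? p.1 = some p.2) : d.items = l := by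
  have hlen : d.items.length = l.length := by
    have := congrArg List.length hk
    simpa [PySem.Dict.keys] using this
  apply List.ext_getElem hlen
  intro i h1 h2
  have hfst : d.items[i].1 = l[i].1 := by
    have := congrArg (fun xs => xs[i]?) hk
    simp only [PySem.Dict.keys] at this
    rw [List.getElem?_map, List.getElem?_map] at this
    simp only [List.getElem?_eq_getElem, h1, h2] at this
    simpa using this
  have hmem : (d.items[i].1, d.items[i].2) ∈ d.items := by
    simpa using List.getElem_mem h1
  have hnk : d.keys.Nodup := by rw [hk]; exact hnd
  have h3 : d.get? d.items[i].1 = some d.items[i].2 := PySem.Dict.get?_of_mem_items d hmem hnk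
  have h4 : d.get? l[i].1 = some l[i].2 := hg l[i] (List.getElem_mem h2)
  rw [hfst] at h3
  rw [h3] at h4
  exact Prod.ext hfst (by simpa using h4)

theorem pv_contains_get? (d : PySem.Dict String (List String)) (k : String)
    (h : d.contains k = true) : d.get? k = some (d.getD k []) := by
  rw [PySem.Dict.contains_eq_isSome_get?] at h
  cases hg : d.get? k with
  | none => rw [hg] at h; simp at h
  | some v => rw [PySem.Dict.getD_eq_get?_getD, hg]; rfl

-- ===== VERDICT (by name: the statement is the Claim_ definition above) =====
theorem link_sqs_queue_policy_spec : Claim_equal_link_sqs_queue_policy := by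
  intro td _ hpre
  unfold Spec_link_sqs_queue_policy link_sqs_queue_policy link_sqs_queue_policy_alt
  have hnd : (td.map Prod.fst).Nodup := hpre
  set ptq := (PySem.List.sorted td (fun p => p.1) false).foldl pvPolicyStep PySem.Dict.empty with hptq
  -- B's dict is the mapped list
  have hB : (td.foldl (fun res rd => res.insert rd.1 (pvNewDeps td rd.2)) PySem.Dict.empty).items
      = td.map (fun rd => (rd.1, pvNewDeps td rd.2)) := by
    have := PySem.Dict.items_foldl_insert_fresh td (fun rd => rd.1)
      (fun rd => pvNewDeps td rd.2) PySem.Dict.empty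
      (fun a _ => PySem.Dict.contains_empty a.1) hnd
    simpa using this
  rw [hB]
  -- A's dict has the same items
  have hmk : ∀ p ∈ td, (PySem.Dict.mk td).contains p.1 = true ∧ (PySem.Dict.mk td).getD p.1 [] = p.2 := by
    intro p hp
    have hf : td.find? (fun q => q.1 == p.1) = some p := pv_find?_self hnd hp
    constructor
    · rw [PySem.Dict.contains_eq_isSome_get?, pv_get?_mk, hf]; rfl
    · rw [PySem.Dict.getD_eq_get?_getD, pv_get?_mk, hf]; rfl
  have hperm := PySem.List.sorted_perm td (fun p => p.1) false
  have hnds : ((PySem.List.sorted td (fun p => p.1) false).map Prod.fst).Nodup :=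
    ((hperm.map Prod.fst).nodup_iff).2 hnd
  obtain ⟨hAk, hAg⟩ := pv_outer ptq (PySem.List.sorted td (fun p => p.1) false)
    (PySem.Dict.mk td) hnds (fun p hp => hmk p (hperm.subset hp))
  apply pv_items_eq
  · rw [hAk]
    show (PySem.Dict.mk td).items.map Prod.fst = _
    rw [show (PySem.Dict.mk td).items = td from rfl, List.map_map]
    rfl
  · rw [List.map_map]
    exact hnd
  · intro p hp
    obtain ⟨rd, hrd, rfl⟩ := List.mem_map.1 hp
    have hcont : ((PySem.List.sorted td (fun q => q.1) false).foldl (pvLinkStep ptq) (PySem.Dict.mk td)).contains rd.1 = true := by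
      rw [PySem.Dict.contains_iff_mem_keys, hAk]
      show rd.1 ∈ (PySem.Dict.mk td).items.map Prod.fst
      rw [show (PySem.Dict.mk td).items = td from rfl]
      exact List.mem_map_of_mem hrd
    rw [pv_contains_get? _ _ hcont, hAg rd.1]
    rw [pv_find?_perm hperm hnds rd.1, pv_find?_self hnd hrd]
    have hbr := pv_newdeps_bridge td hnd rd.2 rd.2
    rw [← hptq] at hbr
    have hred : (match some rd with
        | some p => pvNewDepsP ptq p.2 p.2
        | none => (PySem.Dict.mk td).getD rd.1 []) = pvNewDepsP ptq rd.2 rd.2 := rfl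
    rw [hred, hbr]
    rfl
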